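-- pv_equiv track=rewrite | github.com/AdamSypitkowski/Gene-Sequencer-Project | proj04.py | find_best_individual
-- ===== SOURCE A (Python) =====
-- def fitness(target, individual):
--     fitness_count = 0
--     for ch in range(len(target)):
--         # Determines if each letter in the string is the same as the target
--         if target[ch] == individual[ch]:
--             fitness_count += 1
--
--     # This value is the overall % likeness value
--     total_fitness = fitness_count / len(target)
--     return total_fitness
--     pass
--
-- def find_best_individual(population, target):
--     max_fitness = -1
--     max_individual = ''
--     for i in range(int(len(population)/len(target))):
--         individual = population[i * len(target):(i * len(target) + len(target))]
--         # Calls the fitness function to determine the likeness value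
--         fitness_val = fitness(target, individual)
--
--         # Determines if the individual is most fit
--         if fitness_val > max_fitness:
--             max_fitness = fitness_val
--             max_individual = individual
--     return max_individual
--     pass
-- ===== SOURCE B (Python) =====
-- def find_best_individual(population, target):
--     L = len(target)
--     n = len(population) // L  # raises ZeroDivisionError on empty target, like A
--     best = -1
--     best_start = 0
--     run = 0
--     for i in range(n * L):
--         if population[i] == target[i % L]:
--             run += 1
--         if (i + 1) % L == 0:
--             if run > best:
--                 best = run
--                 best_start = i + 1 - L
--             run = 0
--     if best < 0:
--         return ''
--     return population[best_start:best_start + L]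
-- ===== Notes on version B (the rewrite author's own statement) =====
-- stated objective: alternative
-- what changed: Replaced the slice-each-chunk-then-score structure (a nested per-chunk fitness pass over fresh substring copies, compared by float ratio) with a single flat scan over the population that keeps a running match count against target[i % len(target)], updating the best count and best start index at each chunk boundary; only the winning chunk is sliced once at the end.
import Mathlib
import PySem

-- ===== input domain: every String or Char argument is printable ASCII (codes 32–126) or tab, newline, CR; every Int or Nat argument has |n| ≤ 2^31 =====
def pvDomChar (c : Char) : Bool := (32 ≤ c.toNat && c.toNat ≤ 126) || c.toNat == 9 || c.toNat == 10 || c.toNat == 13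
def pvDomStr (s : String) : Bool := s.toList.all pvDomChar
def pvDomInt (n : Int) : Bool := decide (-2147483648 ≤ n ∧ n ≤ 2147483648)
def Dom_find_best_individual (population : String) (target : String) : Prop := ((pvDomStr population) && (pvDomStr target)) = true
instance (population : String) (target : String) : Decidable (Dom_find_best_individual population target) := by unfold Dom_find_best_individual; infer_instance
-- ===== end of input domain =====

-- B replaces A's slice-each-chunk-then-score-it structure by one flat scan with a running
-- match count and best-start index, slicing only the winner at the end (objective: alternative).

-- ===== PORT A =====
-- fitness(target, individual): counted matches divided by len(target); exact rationals stand in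
-- for Python floats (the compared ratios share the denominator len(target), so every float
-- comparison A makes has the same outcome as the exact one on the admitted domain).
def pyFitness (target individual : List Char) : ℚ :=
  (((List.range target.length).foldl
      (fun fc ch =>
        if PySem.List.pyGet? target ((ch : Nat) : Int) = PySem.List.pyGet? individual ((ch : Nat) : Int)
        then fc + 1 else fc) (0 : Nat) : Nat) : ℚ) / ((target.length : Nat) : ℚ)

def pvStepA (p t : List Char) (acc : ℚ × List Char) (i : Nat) : ℚ × List Char :=
  let ind := PySem.List.slice p (some ((i * t.length : Nat) : Int))
      (some (((i * t.length : Nat) : Int) + ((t.length : Nat) : Int)))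
  let fv := pyFitness t ind
  if acc.1 < fv then (fv, ind) else acc

-- int(len(population)/len(target)) is exact floor division for the lengths the domain admits.
def find_best_individual (population : String) (target : String) : String :=
  let p := population.toList
  let t := target.toList
  let st := (List.range (p.length / t.length)).foldl (pvStepA p t) ((-1 : ℚ), ([] : List Char))
  String.mk st.2

-- ===== PORT B =====
def pvStepB (p t : List Char) (acc : Nat × Int × Nat) (i : Nat) : Nat × Int × Nat :=
  let run := if PySem.List.pyGet? p ((i : Nat) : Int) = PySem.List.pyGet? t ((i % t.length : Nat) : Int)
             then acc.1 + 1 else acc.1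
  if (i + 1) % t.length = 0 then
    if acc.2.1 < (run : Int) then (0, (run : Int), i + 1 - t.length) else (0, acc.2.1, acc.2.2)
  else (run, acc.2.1, acc.2.2)

def find_best_individual_alt (population : String) (target : String) : String :=
  let p := population.toList
  let t := target.toList
  let st := (List.range ((p.length / t.length) * t.length)).foldl (pvStepB p t) (0, -1, 0)
  if st.2.1 < 0 then "" else
    String.mk (PySem.List.slice p (some ((st.2.2 : Nat) : Int))
      (some (((st.2.2 : Nat) : Int) + ((t.length : Nat) : Int))))

-- ===== PRECONDITION & SPEC =====
-- Pre_ excludes only the empty target, on which Python A raises ZeroDivisionError.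
def Pre_find_best_individual (population : String) (target : String) : Prop := target ≠ ""
instance (population : String) (target : String) : Decidable (Pre_find_best_individual population target) := by unfold Pre_find_best_individual; infer_instance
def pvWitness_find_best_individual : String × String := ("abab", "ab")

def Spec_find_best_individual (population : String) (target : String) (out : String) : Prop := out = find_best_individual_alt population target
instance (population : String) (target : String) (out : String) : Decidable (Spec_find_best_individual population target out) := by unfold Spec_find_best_individual; infer_instance

-- ===== CLAIM (what is proved, stated in full; the proofs are below) =====
def Claim_equal_find_best_individual : Prop := ∀ (population : String) (target : String), Dom_find_best_individual population target → Pre_find_best_individual population target → Spec_find_best_individual population target (find_best_individual population target)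

-- ===== LEMMAS AND PROOFS =====

-- match count of chunk k restricted to its first j positions
def pvCntP (p t : List Char) (k j : Nat) : Nat :=
  (List.range j).foldl
    (fun fc r =>
      if PySem.List.pyGet? p ((k * t.length + r : Nat) : Int) = PySem.List.pyGet? t ((r : Nat) : Int)
      then fc + 1 else fc) 0

lemma pvCntP_succ (p t : List Char) (k j : Nat) :
    pvCntP p t k (j + 1) =
      if PySem.List.pyGet? p ((k * t.length + j : Nat) : Int) = PySem.List.pyGet? t ((j : Nat) : Int)
      then pvCntP p t k j + 1 else pvCntP p t k j := by
  unfold pvCntP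
  rw [List.range_succ, List.foldl_append]
  simp

lemma pyGet?_natCast' (xs : List Char) (n : Nat) :
    PySem.List.pyGet? xs ((n : Nat) : Int) = xs[n]? := by
  simp [PySem.List.pyGet?, PySem.List.pyIdx?]
  split_ifs with h
  · simp
  · exact (List.getElem?_eq_none (by omega)).symm

-- A's fitness on chunk k equals the canonical count (chunk fully inside p)
lemma pyFitness_chunk (p t : List Char) (k : Nat) :
    pyFitness t (PySem.List.slice p (some ((k * t.length : Nat) : Int))
      (some (((k * t.length : Nat) : Int) + ((t.length : Nat) : Int)))) =
    ((pvCntP p t k t.length : Nat) : ℚ) / ((t.length : Nat) : ℚ) := by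
  unfold pyFitness
  rw [PySem.List.slice_natCast_add]
  congr 2
  unfold pvCntP
  have key : ∀ j, j ≤ t.length →
      (List.range j).foldl
        (fun fc ch =>
          if PySem.List.pyGet? t ((ch : Nat) : Int) =
              PySem.List.pyGet? (List.take t.length (List.drop (k * t.length) p)) ((ch : Nat) : Int)
          then fc + 1 else fc) 0 =
      (List.range j).foldl
        (fun fc r =>
          if PySem.List.pyGet? p ((k * t.length + r : Nat) : Int) = PySem.List.pyGet? t ((r : Nat) : Int)
          then fc + 1 else fc) 0 := by
    intro j hj
    induction j with
    | zero => simp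
    | succ j ih =>
      rw [List.range_succ, List.foldl_append, List.foldl_append, ih (by omega)]
      have hjL : j < t.length := by omega
      have hidx : PySem.List.pyGet? (List.take t.length (List.drop (k * t.length) p)) ((j : Nat) : Int)
          = PySem.List.pyGet? p ((k * t.length + j : Nat) : Int) := by
        rw [pyGet?_natCast', pyGet?_natCast']
        rw [List.getElem?_take, if_pos hjL, List.getElem?_drop]
      simp only [List.foldl_cons, List.foldl_nil, hidx]
      by_cases h : PySem.List.pyGet? p ((k * t.length + j : Nat) : Int) = PySem.List.pyGet? t ((j : Nat) : Int)
      · rw [if_pos h.symm, if_pos h]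
      · rw [if_neg (fun he => h he.symm), if_neg h]
  exact key t.length le_rfl

-- B over the interior of chunk k: the boundary test never fires, run accumulates pvCntP
lemma pvStepB_partial (p t : List Char) (k : Nat) (b : Int) (s : Nat) :
    ∀ j, j < t.length →
      ((List.range j).map (fun x => k * t.length + x)).foldl (pvStepB p t) (0, b, s)
        = (pvCntP p t k j, b, s) := by
  intro j hj
  induction j with
  | zero => simp [pvCntP]
  | succ j ih =>
    rw [List.range_succ, List.map_append, List.foldl_append, ih (by omega)]
    have hjL : j < t.length := by omega
    simp only [List.map_cons, List.map_nil, List.foldl_cons, List.foldl_nil]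
    have hmod : (k * t.length + j) % t.length = j := by
      rw [Nat.mul_add_mod']; exact Nat.mod_eq_of_lt hjL
    have hbd : (k * t.length + j + 1) % t.length ≠ 0 := by
      rw [Nat.add_assoc, Nat.mul_add_mod', Nat.mod_eq_of_lt (by omega)]
      omega
    simp only [pvStepB, hmod, hbd]
    rw [pvCntP_succ]
    by_cases h : PySem.List.pyGet? p ((k * t.length + j : Nat) : Int) = PySem.List.pyGet? t ((j : Nat) : Int)
    · simp only [if_pos h]
      simp
    · simp only [if_neg h]
      simp

-- B over one whole chunk: compare the chunk count with the best, reset run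
lemma pvStepB_chunk (p t : List Char) (hL : 0 < t.length) (k : Nat) (b : Int) (s : Nat) :
    ((List.range t.length).map (fun x => k * t.length + x)).foldl (pvStepB p t) (0, b, s)
      = if b < (pvCntP p t k t.length : Int) then (0, (pvCntP p t k t.length : Int), k * t.length)
        else (0, b, s) := by
  have hL' : t.length = (t.length - 1) + 1 := by omega
  set L' := t.length - 1 with hL'def
  rw [show List.range t.length = List.range L' ++ [L'] from by conv_lhs => rw [hL', List.range_succ]]
  rw [List.map_append, List.foldl_append, pvStepB_partial p t k b s L' (by omega)]
  simp only [List.map_cons, List.map_nil, List.foldl_cons, List.foldl_nil]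
  have hmod : (k * t.length + L') % t.length = L' := by
    rw [Nat.mul_add_mod']; exact Nat.mod_eq_of_lt (by omega)
  have hbd : (k * t.length + L' + 1) % t.length = 0 := by
    have h2 : k * t.length + L' + 1 = (k + 1) * t.length := by rw [hL']; ring
    rw [h2, Nat.mul_mod_left]
  have hsub : k * t.length + L' + 1 - t.length = k * t.length := by omega
  have hsplit : pvCntP p t k t.length =
      if PySem.List.pyGet? p ((k * t.length + L' : Nat) : Int) = PySem.List.pyGet? t ((L' : Nat) : Int)
      then pvCntP p t k L' + 1 else pvCntP p t k L' := by
    conv_lhs => rw [hL']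
    exact pvCntP_succ p t k L'
  simp only [pvStepB, hmod, hbd, hsub]
  rw [hsplit]
  by_cases h : PySem.List.pyGet? p ((k * t.length + L' : Nat) : Int) = PySem.List.pyGet? t ((L' : Nat) : Int)
  · simp only [if_pos h]
    simp
  · simp only [if_neg h]
    simp

-- the joint loop invariant after k chunks
def pvInv (p t : List Char) (k : Nat) : Prop :=
  (k = 0 ∧
    (List.range k).foldl (pvStepA p t) ((-1 : ℚ), ([] : List Char)) = ((-1 : ℚ), ([] : List Char)) ∧
    (List.range (k * t.length)).foldl (pvStepB p t) (0, -1, 0) = (0, -1, 0)) ∨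
  (∃ c s : Nat,
    (List.range k).foldl (pvStepA p t) ((-1 : ℚ), ([] : List Char))
      = (((c : Nat) : ℚ) / ((t.length : Nat) : ℚ),
         PySem.List.slice p (some ((s : Nat) : Int)) (some (((s : Nat) : Int) + ((t.length : Nat) : Int)))) ∧
    (List.range (k * t.length)).foldl (pvStepB p t) (0, -1, 0) = (0, (c : Int), s))

lemma pvInv_holds (p t : List Char) (hL : 0 < t.length) :
    ∀ k, pvInv p t k := by
  intro k
  induction k with
  | zero => exact Or.inl ⟨rfl, by simp, by simp⟩
  | succ k ih =>
    have hA : (List.range (k + 1)).foldl (pvStepA p t) ((-1 : ℚ), ([] : List Char))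
        = pvStepA p t ((List.range k).foldl (pvStepA p t) ((-1 : ℚ), ([] : List Char))) k := by
      rw [List.range_succ, List.foldl_append]; simp
    have hB : (List.range ((k + 1) * t.length)).foldl (pvStepB p t) (0, -1, 0)
        = ((List.range t.length).map (fun x => k * t.length + x)).foldl (pvStepB p t)
            ((List.range (k * t.length)).foldl (pvStepB p t) (0, -1, 0)) := by
      have : (k + 1) * t.length = k * t.length + t.length := by ring
      rw [this, List.range_add, List.foldl_append]
    set c1 := pvCntP p t k t.length with hc1
    have hLq : (0 : ℚ) < ((t.length : Nat) : ℚ) := by exact_mod_cast hL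
    rcases ih with ⟨-, hA0, hB0⟩ | ⟨c, s, hA0, hB0⟩
    · -- first chunk result: both sides always update
      refine Or.inr ⟨c1, k * t.length, ?_, ?_⟩
      · rw [hA, hA0]
        simp only [pvStepA]
        rw [pyFitness_chunk p t k]
        have hpos : (-1 : ℚ) < ((c1 : Nat) : ℚ) / ((t.length : Nat) : ℚ) := by
          have : (0 : ℚ) ≤ ((c1 : Nat) : ℚ) / ((t.length : Nat) : ℚ) :=
            div_nonneg (by positivity) (le_of_lt hLq)
          linarith
        rw [if_pos hpos]
      · rw [hB, hB0, pvStepB_chunk p t hL k (-1) 0]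
        rw [if_pos (by omega)]
    · -- later chunks: both sides compare the same counts
      by_cases h : c < c1
      · refine Or.inr ⟨c1, k * t.length, ?_, ?_⟩
        · rw [hA, hA0]
          simp only [pvStepA]
          rw [pyFitness_chunk p t k]
          rw [if_pos ((div_lt_div_iff_of_pos_right hLq).mpr (by exact_mod_cast h))]
        · rw [hB, hB0, pvStepB_chunk p t hL k (c : Int) s, if_pos (by exact_mod_cast h)]
      · refine Or.inr ⟨c, s, ?_, ?_⟩
        · rw [hA, hA0]
          simp only [pvStepA]
          rw [pyFitness_chunk p t k]
          rw [if_neg (fun hlt => h (by exact_mod_cast (div_lt_div_iff_of_pos_right hLq).mp hlt))]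
        · rw [hB, hB0, pvStepB_chunk p t hL k (c : Int) s, if_neg (by exact_mod_cast h)]

-- ===== VERDICT (by name: the statement is the Claim_ definition above) =====
theorem find_best_individual_spec : Claim_equal_find_best_individual := by
  intro population target _ hpre
  unfold Spec_find_best_individual
  simp only [find_best_individual, find_best_individual_alt]
  have hL : 0 < target.toList.length := by
    rcases Nat.eq_zero_or_pos target.toList.length with h0 | h0
    · exact absurd (String.toList_eq_nil_iff.mp (List.length_eq_zero_iff.mp h0)) hpre
    · exact h0
  rcases pvInv_holds population.toList target.toList hL
      (population.toList.length / target.toList.length) with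
    ⟨-, hA0, hB0⟩ | ⟨c, s, hA0, hB0⟩
  · rw [hA0, hB0]
    simp
    rfl
  · rw [hA0, hB0]
    simp only
    rw [if_neg (by omega)]
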